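-- pv_equiv track=rewrite | github.com/daudef/classement | classement.py | calculerNombreQuestion
-- ===== SOURCE A (Python) =====
-- def calculerNombreQuestion(elements):
--     n = len(elements)
--     puissance2superieure = 1
--     log2n = 0
--     nombreQuestion = 0
--     for i in range(1, n+1):
--         nombreQuestion += log2n
--         if i == puissance2superieure:
--             puissance2superieure *= 2
--             log2n += 1
--     return nombreQuestion
-- ===== SOURCE B (Python) =====
-- def calculerNombreQuestion(elements):
--     # Closed-form summation over power-of-two blocks: O(log n) instead of O(n).
--     n = len(elements)
--     total = 0
--     p = 1
--     k = 1
--     while p < n: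
--         hi = min(2 * p, n)
--         total += (hi - p) * k
--         p *= 2
--         k += 1
--     return total
-- ===== Notes on version B (the rewrite author's own statement) =====
-- stated objective: faster
-- what changed: Replaced the per-element loop counting ceil(log2 i) for i=1..n by a block summation over the O(log n) power-of-two blocks (p, 2p], each contributing (hi-p)*k with integer arithmetic.
import Mathlib
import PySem

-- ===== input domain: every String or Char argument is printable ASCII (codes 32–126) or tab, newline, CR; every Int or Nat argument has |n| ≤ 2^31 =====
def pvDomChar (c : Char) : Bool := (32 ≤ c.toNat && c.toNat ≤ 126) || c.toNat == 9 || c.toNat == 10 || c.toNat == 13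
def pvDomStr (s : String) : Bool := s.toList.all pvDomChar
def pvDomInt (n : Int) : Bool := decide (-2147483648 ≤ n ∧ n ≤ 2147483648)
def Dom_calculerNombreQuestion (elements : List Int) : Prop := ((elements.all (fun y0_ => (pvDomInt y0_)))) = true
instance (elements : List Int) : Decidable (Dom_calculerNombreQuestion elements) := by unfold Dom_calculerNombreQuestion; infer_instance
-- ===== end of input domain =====

-- B replaces A's O(n) per-element loop by an O(log n) summation over power-of-two blocks (objective: faster).

-- ===== PORT A =====
-- state = (puissance2superieure, log2n, nombreQuestion)
def pvStepA (s : Int × Int × Int) (i : Int) : Int × Int × Int :=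
  let nq := s.2.2 + s.2.1
  if i = s.1 then (s.1 * 2, s.2.1 + 1, nq) else (s.1, s.2.1, nq)

def calculerNombreQuestion (elements : List Int) : Int :=
  ((PySem.List.pyRange 1 ((elements.length : Int) + 1) 1).foldl pvStepA (1, 0, 0)).2.2

-- ===== PORT B =====
-- fuel only makes the while-loop total in Lean; it is never exhausted (p doubles from 1, so
-- the loop runs at most log2 n + 1 ≤ n times, and fuel = n + 1).
def pvBloop : Nat → Int → Int → Int → Int → Int
  | 0, _, _, _, total => total
  | fuel + 1, n, p, k, total =>
    if p < n then pvBloop fuel n (2 * p) (k + 1) (total + (min (2 * p) n - p) * k)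
    else total

def calculerNombreQuestion_alt (elements : List Int) : Int :=
  pvBloop (elements.length + 1) (elements.length : Int) 1 1 0

-- ===== PRECONDITION & SPEC =====
def Spec_calculerNombreQuestion (elements : List Int) (out : Int) : Prop := out = calculerNombreQuestion_alt elements
instance (elements : List Int) (out : Int) : Decidable (Spec_calculerNombreQuestion elements out) := by unfold Spec_calculerNombreQuestion; infer_instance

-- ===== CLAIM (what is proved, stated in full; the proofs are below) =====
def Claim_equal_calculerNombreQuestion : Prop := ∀ (elements : List Int), Dom_calculerNombreQuestion elements → Spec_calculerNombreQuestion elements (calculerNombreQuestion elements)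

-- ===== LEMMAS AND PROOFS =====

-- Over a range that stays strictly below the next power-of-two threshold P, A's loop
-- just adds k per element: (b - a) * k in total.
theorem pvFoldConst (a b P k t : Int) (hab : a ≤ b) (hbP : b ≤ P) :
    (PySem.List.pyRange a b 1).foldl pvStepA (P, k, t) = (P, k, t + (b - a) * k) := by
  obtain ⟨m, hm⟩ : ∃ m : ℕ, b = a + m := ⟨(b - a).toNat, by omega⟩
  subst hm
  induction m generalizing a t with
  | zero =>
    rw [PySem.List.pyRange_one_eq_nil (by simp)]
    simp
  | succ m ih =>
    have hlt : a < a + ((m : Int) + 1) := by omega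
    rw [show ((m + 1 : ℕ) : Int) = (m : Int) + 1 from by push_cast; ring] at *
    rw [PySem.List.pyRange_one_cons hlt, List.foldl_cons]
    have hne : a ≠ P := by omega
    have hstep : pvStepA (P, k, t) a = (P, k, t + k) := by
      simp [pvStepA, hne]
    rw [hstep]
    have hsplit : a + ((m : Int) + 1) = (a + 1) + (m : Int) := by ring
    rw [hsplit]
    rw [ih (a + 1) (t + k) (by omega) (by omega)]
    congr 2
    ring

-- Main invariant: with A's loop about to process i = p+1 in state (2p, k, t) (p ≥ 1 the last
-- power of two reached), the rest of A's loop computes exactly B's block loop from (p, k, t).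
theorem pvMain (fuel : ℕ) : ∀ (n p k t : Int), (n - p).toNat < fuel → 1 ≤ p →
    ((PySem.List.pyRange (p + 1) (n + 1) 1).foldl pvStepA (2 * p, k, t)).2.2
      = pvBloop fuel n p k t := by
  induction fuel with
  | zero => intro n p k t h _; exact absurd h (Nat.not_lt_zero _)
  | succ fuel ih =>
    intro n p k t h hp
    by_cases hpn : p < n
    · by_cases h2p : 2 * p ≤ n
      · -- full block (p, 2p], then the boundary step at i = 2p, then recurse
        rw [PySem.List.pyRange_one_append (p + 1) (2 * p) (n + 1) (by omega) (by omega),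
          List.foldl_append,
          pvFoldConst (p + 1) (2 * p) (2 * p) k t (by omega) (le_refl _),
          PySem.List.pyRange_one_cons (by omega : (2 * p : Int) < n + 1),
          List.foldl_cons]
        have hstep : pvStepA (2 * p, k, t + (2 * p - (p + 1)) * k) (2 * p)
            = (2 * (2 * p), k + 1, t + (2 * p - p) * k) := by
          simp [pvStepA]; constructor
          · ring
          · ring
        rw [hstep, ih n (2 * p) (k + 1) (t + (2 * p - p) * k) (by omega) (by omega)]
        simp [pvBloop, hpn, min_eq_left h2p]
      · -- partial last block (p, n], no boundary reached
        have hn2 : n < 2 * p := by omega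
        rw [pvFoldConst (p + 1) (n + 1) (2 * p) k t (by omega) (by omega)]
        have hrem := ih n (2 * p) (k + 1) (t + (n + 1 - (p + 1)) * k) (by omega) (by omega)
        rw [PySem.List.pyRange_one_eq_nil (by omega)] at hrem
        simp only [List.foldl_nil] at hrem
        rw [show ((2 * p, k, t + (n + 1 - (p + 1)) * k) : Int × Int × Int).2.2
            = t + (n + 1 - (p + 1)) * k from rfl, hrem]
        simp only [pvBloop, if_pos hpn, min_eq_right hn2.le]
        congr 1
        ring
    · rw [PySem.List.pyRange_one_eq_nil (by omega)]
      simp [pvBloop, hpn]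

-- ===== VERDICT (by name: the statement is the Claim_ definition above) =====
theorem calculerNombreQuestion_spec : Claim_equal_calculerNombreQuestion := by
  intro elements _
  unfold Spec_calculerNombreQuestion calculerNombreQuestion calculerNombreQuestion_alt
  set n : Int := (elements.length : Int) with hn
  rcases Nat.eq_zero_or_pos elements.length with h0 | hpos
  · rw [PySem.List.pyRange_one_eq_nil (by omega)]
    simp [pvBloop, show n = 0 from by omega]
  · have h1 : (1 : Int) < n + 1 := by omega
    rw [PySem.List.pyRange_one_cons h1, List.foldl_cons]
    have hstep : pvStepA (1, 0, 0) 1 = (2 * 1, 1, 0) := by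
      simp [pvStepA]
    rw [hstep, pvMain (elements.length + 1) n 1 1 0 (by omega) (by omega)]
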